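-- pv_equiv track=rewrite | github.com/sandeshvora/Python_DSA | validMountainArray.py | validMountain
-- ===== SOURCE A (Python) =====
-- def validMountain(n):
--     i=1
--     while(i<len(n) and n[i]> n[i-1]):
--         i+=1
--     if(i==1 or i == len(n)):
--         return False
--     while(i < len(n) and n[i]<n[i-1]):
--         i+=1
--     return i == len(n)
-- ===== SOURCE B (Python) =====
-- def validMountain(n):
--     left = 0
--     while left + 1 < len(n) and n[left] < n[left + 1]:
--         left += 1
--     right = len(n) - 1
--     while right - 1 >= 0 and n[right] < n[right - 1]:
--         right -= 1
--     return left > 0 and right < len(n) - 1 and left == right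
-- ===== Notes on version B (the rewrite author's own statement) =====
-- stated objective: alternative
-- what changed: Replaces A's single sequential up-then-down walk with two independent opposite-direction scans (a left climb from the front and a right climb from the back) that must meet at an interior single peak.
import Mathlib
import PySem

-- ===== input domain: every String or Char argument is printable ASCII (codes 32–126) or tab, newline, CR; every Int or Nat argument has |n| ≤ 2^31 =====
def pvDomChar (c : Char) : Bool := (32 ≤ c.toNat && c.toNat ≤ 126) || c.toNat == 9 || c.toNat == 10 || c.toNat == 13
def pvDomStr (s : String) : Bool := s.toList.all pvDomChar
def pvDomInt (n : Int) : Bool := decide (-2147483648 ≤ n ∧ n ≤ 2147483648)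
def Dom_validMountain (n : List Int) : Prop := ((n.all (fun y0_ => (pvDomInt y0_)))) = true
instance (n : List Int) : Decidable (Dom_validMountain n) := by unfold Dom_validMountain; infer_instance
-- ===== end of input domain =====

-- B checks "valid mountain" with two independent opposite-direction scans meeting at the peak,
-- instead of A's single up-then-down walk (alternative decomposition, same O(n) cost).

-- ===== PORT A =====
-- first while loop of A: advance i while i < len(n) and n[i] > n[i-1]
def upA (n : List Int) (i : Nat) : Nat :=
  if h : i < n.length ∧ n[i]! > n[i-1]! then upA n (i+1) else i
termination_by n.length - i
decreasing_by omega

-- second while loop of A: advance i while i < len(n) and n[i] < n[i-1]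
def downA (n : List Int) (i : Nat) : Nat :=
  if h : i < n.length ∧ n[i]! < n[i-1]! then downA n (i+1) else i
termination_by n.length - i
decreasing_by omega

def validMountain (n : List Int) : Bool :=
  let i := upA n 1
  if i = 1 ∨ i = n.length then false
  else decide (downA n i = n.length)

-- ===== PORT B =====
-- left while loop of B: advance left while left+1 < len(n) and n[left] < n[left+1]
def advL (n : List Int) (l : Nat) : Nat :=
  if h : l+1 < n.length ∧ n[l]! < n[l+1]! then advL n (l+1) else l
termination_by n.length - l
decreasing_by omega

-- right while loop of B: decrement right while right-1 >= 0 and n[right] < n[right-1].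
-- Indices are rendered as Nat: Python's right is -1 only when n = [], where both the
-- loop guard (right-1 >= 0) and the final test (right < len(n)-1) are false, exactly
-- as they are for the Nat rendering right = 0, len(n)-1 = 0.
def advR (n : List Int) (r : Nat) : Nat :=
  if h : 1 ≤ r ∧ n[r]! < n[r-1]! then advR n (r-1) else r
termination_by r
decreasing_by omega

def validMountain_alt (n : List Int) : Bool :=
  let l := advL n 0
  let r := advR n (n.length - 1)
  decide (0 < l) && decide (r < n.length - 1) && decide (l = r)

-- ===== PRECONDITION & SPEC =====
def Spec_validMountain (n : List Int) (out : Bool) : Prop := out = validMountain_alt n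
instance (n : List Int) (out : Bool) : Decidable (Spec_validMountain n out) := by unfold Spec_validMountain; infer_instance

-- ===== CLAIM (what is proved, stated in full; the proofs are below) =====
def Claim_equal_validMountain : Prop := ∀ (n : List Int), Dom_validMountain n → Spec_validMountain n (validMountain n)

-- ===== LEMMAS AND PROOFS =====

-- A's up-scan from l+1 is B's left scan from l, shifted by one.
theorem up_adv (n : List Int) (l : Nat) : upA n (l+1) = advL n l + 1 := by
  rw [upA, advL]
  by_cases h : l+1 < n.length ∧ n[l]! < n[l+1]!
  · have h' : l+1 < n.length ∧ n[l+1]! > n[l+1-1]! := by simpa using h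
    rw [dif_pos h', dif_pos h]
    exact up_adv n (l+1)
  · have h' : ¬ (l+1 < n.length ∧ n[l+1]! > n[l+1-1]!) := by simpa using h
    rw [dif_neg h', dif_neg h]
termination_by n.length - l
decreasing_by omega

-- the left scan stays below the length
theorem advL_lt (n : List Int) (l : Nat) (h : l < n.length) : advL n l < n.length := by
  rw [advL]
  split
  · exact advL_lt n (l+1) (by omega)
  · exact h
termination_by n.length - l
decreasing_by next hc => exact by omega

-- everything strictly increases up to where the left scan stopped
theorem advL_inc (n : List Int) (l j : Nat) (h1 : l ≤ j) (h2 : j < advL n l) :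
    n[j]! < n[j+1]! := by
  rw [advL] at h2
  split at h2
  next hc =>
    rcases Nat.eq_or_lt_of_le h1 with rfl | hlt
    · exact hc.2
    · exact advL_inc n (l+1) j hlt h2
  next => omega
termination_by n.length - l
decreasing_by next h _ => exact by omega

-- the right scan never goes up
theorem advR_le (n : List Int) (r : Nat) : advR n r ≤ r := by
  rw [advR]
  split
  next hc => have := advR_le n (r-1); omega
  next => exact Nat.le_refl r
termination_by r
decreasing_by omega

-- everything strictly decreases from where the right scan stopped to its start
theorem advR_dec (n : List Int) (r j : Nat) (h1 : advR n r < j) (h2 : j ≤ r) :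
    n[j]! < n[j-1]! := by
  rw [advR] at h1
  split at h1
  next hc =>
    rcases Nat.eq_or_lt_of_le h2 with rfl | hlt
    · exact hc.2
    · exact advR_dec n (r-1) j h1 (by omega)
  next => omega
termination_by r
decreasing_by next h _ => exact by omega

-- where the right scan stopped, the guard fails
theorem advR_stop (n : List Int) (r : Nat) :
    advR n r = 0 ∨ ¬ (n[advR n r]! < n[advR n r - 1]!) := by
  rw [advR]
  split
  next hc => exact advR_stop n (r-1)
  next hc =>
    by_cases h0 : r = 0
    · left; exact h0
    · right; intro hlt; exact hc ⟨by omega, hlt⟩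
termination_by r
decreasing_by omega

-- A's down-scan reaches the end iff the suffix strictly decreases
theorem down_iff (n : List Int) (i : Nat) (hi : i ≤ n.length) :
    downA n i = n.length ↔ ∀ j, i ≤ j → j < n.length → n[j]! < n[j-1]! := by
  rw [downA]
  split
  next hc =>
    rw [down_iff n (i+1) (by omega)]
    constructor
    · intro hP j hj1 hj2
      rcases Nat.eq_or_lt_of_le hj1 with rfl | hlt
      · exact hc.2
      · exact hP j hlt hj2
    · intro hP j hj1 hj2; exact hP j (by omega) hj2
  next hc =>
    constructor
    · intro he j hj1 hj2; omega
    · intro hP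
      by_contra hne
      have hi' : i < n.length := by omega
      exact (by simpa [hi'] using hc : ¬ n[i]! < n[i-1]!) (hP i (Nat.le_refl i) hi')
termination_by n.length - i
decreasing_by next hc => exact by omega

theorem validMountain_eq_alt (n : List Int) : validMountain n = validMountain_alt n := by
  unfold validMountain validMountain_alt
  have hup : upA n 1 = advL n 0 + 1 := up_adv n 0
  set l := advL n 0 with hl
  set r := advR n (n.length - 1) with hr
  rw [hup]
  by_cases hl0 : l = 0
  · simp [hl0]
  · have hlen2 : 2 ≤ n.length := by
      by_contra hsmall
      have : ¬ (0 + 1 < n.length ∧ n[0]! < n[0+1]!) := by omega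
      rw [hl, advL, dif_neg this] at hl0
      exact hl0 rfl
    have hlt : l < n.length := advL_lt n 0 (by omega)
    have hrle : r ≤ n.length - 1 := advR_le n (n.length - 1)
    by_cases hle : l + 1 = n.length
    · -- A: i == len → false.  B: l = len-1, so l = r would force ¬(r < len-1).
      have hno : ¬ (0 < l ∧ r < n.length - 1 ∧ l = r) := by
        rintro ⟨_, h2, h3⟩; omega
      have hd : (decide (0 < l) && decide (r < n.length - 1) && decide (l = r))
          = decide (0 < l ∧ r < n.length - 1 ∧ l = r) := by
        simp [Bool.and_assoc]
      simp only [hle, or_true, if_true, hd, hno, decide_false]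
    · have hcond : ¬ (l + 1 = 1 ∨ l + 1 = n.length) := by omega
      rw [if_neg hcond]
      have hiff : downA n (l+1) = n.length ↔ (0 < l ∧ r < n.length - 1 ∧ l = r) := by
        rw [down_iff n (l+1) (by omega)]
        constructor
        · intro hP
          have hrlel : r ≤ l := by
            by_contra hgt
            push Not at hgt
            have hstep : n[r]! < n[r-1]! := hP r (by omega) (by omega)
            rcases advR_stop n (n.length - 1) with h0 | hns
            · omega
            · exact hns hstep
          have hrgel : l ≤ r := by
            by_contra hltr
            push Not at hltr
            have hd : n[l]! < n[l-1]! := advR_dec n (n.length - 1) l (by omega) (by omega)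
            have hi : n[l-1]! < n[l-1+1]! := advL_inc n 0 (l-1) (by omega) (by omega)
            have : l - 1 + 1 = l := by omega
            rw [this] at hi
            omega
          exact ⟨by omega, by omega, by omega⟩
        · rintro ⟨_, hrlt, hlr⟩ j hj1 hj2
          exact advR_dec n (n.length - 1) j (by omega) (by omega)
      have hd : (decide (0 < l) && decide (r < n.length - 1) && decide (l = r))
          = decide (0 < l ∧ r < n.length - 1 ∧ l = r) := by
        simp [Bool.and_assoc]
      rw [hd]
      exact decide_eq_decide.mpr hiff

-- ===== VERDICT (by name: the statement is the Claim_ definition above) =====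
theorem validMountain_spec : Claim_equal_validMountain := by
  intro n _
  unfold Spec_validMountain
  exact validMountain_eq_alt n
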